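-- pv_equiv track=rewrite | github.com/ragib-work/DSA-5-hr-day-with-ragib | day_3/string_9.py | find_occurrance
-- ===== SOURCE A (Python) =====
-- def find_occurrance(s):
--     result = {}  # Start with an empty dictionary , handle edge case like for empty string
--     for i in range(len(s)):  # Start from the first character
--         if s[i] in result:
--             result[s[i]][1] = i  # Update the last index
--         else:
--             result[s[i]] = [i, i]  # Set both first and last index as same
--
--     # Convert lists to tuples for immutability
--     return {char: tuple(indexes) for char, indexes in result.items()}
-- ===== SOURCE B (Python) =====
-- def find_occurrance(s):
--     return {c: (s.index(c), s.rindex(c)) for c in dict.fromkeys(s)}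
-- ===== Notes on version B (the rewrite author's own statement) =====
-- stated objective: idiomatic
-- what changed: Replaces A's single accumulating pass that mutates [first,last] lists in a dict with a dict comprehension over the distinct characters (dict.fromkeys for first-appearance order) that finds each character's first/last index by str.index/str.rindex scans.
import Mathlib
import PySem

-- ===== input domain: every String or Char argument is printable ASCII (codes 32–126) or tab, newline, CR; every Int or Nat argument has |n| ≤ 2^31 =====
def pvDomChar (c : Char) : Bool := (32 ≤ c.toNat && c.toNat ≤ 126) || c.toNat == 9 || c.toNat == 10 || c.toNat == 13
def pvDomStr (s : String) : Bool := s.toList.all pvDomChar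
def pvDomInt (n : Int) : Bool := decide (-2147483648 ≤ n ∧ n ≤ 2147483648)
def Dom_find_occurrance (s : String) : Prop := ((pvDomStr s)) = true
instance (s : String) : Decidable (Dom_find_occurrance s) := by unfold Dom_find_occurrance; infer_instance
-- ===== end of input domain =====

-- B replaces A's single accumulating pass over the string with a dict comprehension
-- over the distinct characters (first-appearance order) using per-character
-- str.index / str.rindex scans; same result, different traversal shape.

-- ===== PORT A =====
def find_occurrance (s : String) : List (String × Int × Int) :=
  -- the loop builds `result`; the final map is the returned dict comprehension
  -- {char: tuple(indexes) for char, indexes in result.items()}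
  (((PySem.List.pyRange 0 (PySem.Str.len s) 1).foldl
    (fun (d : PySem.Dict Char (Int × Int)) i =>
      match PySem.Str.pyGet? s i with
      | some c =>
          if d.contains c then d.modify c (0, 0) (fun p => (p.1, i))  -- result[s[i]][1] = i
          else d.insert c (i, i)                                      -- result[s[i]] = [i, i]
      | none => d)  -- unreachable: i ∈ range(len(s))
    PySem.Dict.empty).items).map (fun p => (String.ofList [p.1], p.2))

-- ===== PORT B =====
-- {c: (s.index(c), s.rindex(c)) for c in dict.fromkeys(s)}
def find_occurrance_alt (s : String) : List (String × Int × Int) :=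
  (PySem.List.dedup s.toList).map (fun c =>
    (String.ofList [c], PySem.Str.find s (String.ofList [c]), PySem.Str.rfind s (String.ofList [c])))

-- ===== PRECONDITION & SPEC =====
def Spec_find_occurrance (s : String) (out : List (String × Int × Int)) : Prop := out = find_occurrance_alt s
instance (s : String) (out : List (String × Int × Int)) : Decidable (Spec_find_occurrance s out) := by unfold Spec_find_occurrance; infer_instance

-- ===== CLAIM (what is proved, stated in full; the proofs are below) =====
def Claim_equal_find_occurrance : Prop := ∀ (s : String), Dom_find_occurrance s → Spec_find_occurrance s (find_occurrance s)

-- ===== LEMMAS AND PROOFS =====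

-- first index of c in l, the value of Python's s.index(c)
def pvFirst (l : List Char) (c : Char) : Int := (l.idxOf c : Int)
-- last index of c in l, the value of Python's s.rindex(c)
def pvLast (l : List Char) (c : Char) : Int := (l.length : Int) - 1 - (l.reverse.idxOf c : Int)

lemma pvLast_append_self (l : List Char) (c : Char) : pvLast (l ++ [c]) c = (l.length : Int) := by
  simp [pvLast]

lemma pvLast_append_ne (l : List Char) (c c' : Char) (h : c' ≠ c) :
    pvLast (l ++ [c]) c' = pvLast l c' := by
  have hb : (c == c') = false := by simp [beq_eq_false_iff_ne]; exact fun e => h e.symm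
  simp [pvLast, List.idxOf_cons, hb]
  ring

lemma pvFirst_append_mem (l t : List Char) (c : Char) (h : c ∈ l) :
    pvFirst (l ++ t) c = pvFirst l c := by
  simp [pvFirst, List.idxOf_append, h]

lemma pvFirst_append_self (l : List Char) (c : Char) (h : c ∉ l) :
    pvFirst (l ++ [c]) c = (l.length : Int) := by
  simp [pvFirst, List.idxOf_append, h]

lemma dedup_append_singleton {α : Type} [BEq α] (l : List α) (c : α) :
    PySem.List.dedup (l ++ [c]) =
      if (PySem.List.dedup l).contains c then PySem.List.dedup l else PySem.List.dedup l ++ [c] := by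
  simp only [PySem.List.dedup_eq_ofList, PySem.Set.ofList_eq_foldl, List.foldl_append]
  rfl

lemma find_go_singleton (c : Char) (l : List Char) (h : c ∈ l) (k : Nat) :
    PySem.Chars.find.go [c] l k = ((k + l.idxOf c : Nat) : Int) := by
  induction l generalizing k with
  | nil => simp at h
  | cons a t ih =>
    rw [PySem.Chars.find.go.eq_2]
    by_cases hac : a = c
    · subst hac
      simp [List.isPrefixOf]
    · have hb : (c == a) = false := by simp [beq_eq_false_iff_ne]; exact fun e => hac e.symm
      have hb2 : (a == c) = false := by simp [beq_eq_false_iff_ne]; exact hac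
      have hm : c ∈ t := by
        cases h with
        | head => exact absurd rfl hac
        | tail _ h' => exact h'
      rw [List.isPrefixOf]
      simp only [hb, Bool.false_and]
      rw [ih hm (k+1)]
      simp [List.idxOf_cons, hb2]
      ring

lemma find_singleton (l : List Char) (c : Char) (h : c ∈ l) :
    PySem.Chars.find l [c] = pvFirst l c := by
  rw [PySem.Chars.find, find_go_singleton c l h 0]
  simp [pvFirst]

lemma isPrefixOf_singleton_iff (c : Char) (l : List Char) :
    [c].isPrefixOf l = true ↔ l.head? = some c := by
  rw [List.isPrefixOf_iff_prefix]
  cases l with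
  | nil => simp
  | cons a t => simp [List.prefix_cons_iff, eq_comm]

lemma rfind_go_singleton (c : Char) (l : List Char) (j : Nat) :
    PySem.Chars.rfind.go l [c] j =
      if c ∈ l.take (j+1) then pvLast (l.take (j+1)) c else -1 := by
  induction j with
  | zero =>
    rw [PySem.Chars.rfind.go.eq_def]
    cases l with
    | nil => simp
    | cons a t =>
      by_cases hac : c = a
      · subst hac; simp [List.isPrefixOf, pvLast]
      · have hb : (c == a) = false := by simp [beq_eq_false_iff_ne]; exact hac
        simp [List.isPrefixOf, hb, hac]
  | succ j ih =>
    rw [PySem.Chars.rfind.go.eq_def]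
    simp only []
    by_cases hlen : j + 1 < l.length
    · have htake : l.take (j+2) = l.take (j+1) ++ [l[j+1]] := by
        rw [List.take_add_one]
        simp [List.getElem?_eq_getElem hlen]
      by_cases hc : l[j+1] = c
      · have hpre : [c].isPrefixOf (l.drop (j+1)) = true := by
          rw [isPrefixOf_singleton_iff, List.head?_drop, List.getElem?_eq_getElem hlen, hc]
        rw [hpre]
        simp only [if_true]
        rw [htake, hc]
        have hmem : c ∈ l.take (j+1) ++ [c] := by simp
        rw [if_pos hmem, pvLast_append_self]
        simp [List.length_take, Nat.min_eq_left (le_of_lt hlen)]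
      · have hpre : [c].isPrefixOf (l.drop (j+1)) = false := by
          rw [Bool.eq_false_iff]
          intro hcon
          rw [isPrefixOf_singleton_iff, List.head?_drop, List.getElem?_eq_getElem hlen] at hcon
          exact hc (Option.some.inj hcon)
        rw [hpre]
        simp only [Bool.false_eq_true, if_false]
        rw [ih, htake]
        have hmem : c ∈ l.take (j+1) ++ [l[j+1]] ↔ c ∈ l.take (j+1) := by
          simp only [List.mem_append, List.mem_singleton]
          exact or_iff_left (fun e => hc e.symm)
        by_cases hm : c ∈ l.take (j+1)
        · rw [if_pos hm, if_pos (hmem.mpr hm), pvLast_append_ne _ _ _ (fun e => hc e.symm)]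
        · rw [if_neg hm, if_neg (fun hx => hm (hmem.mp hx))]
    · have hd : l.drop (j+1) = [] := List.drop_eq_nil_of_le (by omega)
      have ht2 : l.take (j+2) = l := List.take_of_length_le (by omega)
      have ht1 : l.take (j+1) = l := List.take_of_length_le (by omega)
      rw [hd]
      simp only [List.isPrefixOf, Bool.false_eq_true, if_false]
      rw [ih, ht1, ht2]

lemma rfind_singleton (l : List Char) (c : Char) (h : c ∈ l) :
    PySem.Chars.rfind l [c] = pvLast l c := by
  rw [PySem.Chars.rfind, rfind_go_singleton]
  rw [List.take_of_length_le (by omega)]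
  rw [if_pos h]

-- A's loop invariant: after processing the first k characters the dict's items
-- list is the dedup of that prefix, each char paired with its first/last index there
lemma loopA (s : String) (k : Nat) (hk : k ≤ s.toList.length) :
    ((PySem.List.pyRange 0 (k : Int) 1).foldl
      (fun (d : PySem.Dict Char (Int × Int)) i =>
        match PySem.Str.pyGet? s i with
        | some c =>
            if d.contains c then d.modify c (0, 0) (fun p => (p.1, i))
            else d.insert c (i, i)
        | none => d)
      PySem.Dict.empty).items
    = (PySem.List.dedup (s.toList.take k)).map
        (fun c => (c, pvFirst (s.toList.take k) c, pvLast (s.toList.take k) c)) := by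
  induction k with
  | zero => rfl
  | succ k ih =>
    have hk' : k ≤ s.toList.length := by omega
    have hklt : k < s.toList.length := by omega
    have ihk := ih hk'
    have hrange : PySem.List.pyRange 0 ((k+1 : Nat) : Int) 1
        = PySem.List.pyRange 0 (k : Int) 1 ++ [(k : Int)] := by
      push_cast
      exact PySem.List.pyRange_one_succ_right (by positivity)
    rw [hrange, List.foldl_append]
    set c := s.toList[k] with hc
    have hget : PySem.Str.pyGet? s ((k : Nat) : Int) = some c := by
      rw [PySem.Str.pyGet?_natCast, List.getElem?_eq_getElem hklt]
    set d := ((PySem.List.pyRange 0 (k : Int) 1).foldl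
      (fun (d : PySem.Dict Char (Int × Int)) i =>
        match PySem.Str.pyGet? s i with
        | some c =>
            if d.contains c then d.modify c (0, 0) (fun p => (p.1, i))
            else d.insert c (i, i)
        | none => d)
      PySem.Dict.empty) with hd
    have hkeys : d.keys = PySem.List.dedup (s.toList.take k) := by
      simp only [PySem.Dict.keys]
      rw [ihk, List.map_map]
      have hid : ∀ x ∈ PySem.List.dedup (s.toList.take k),
          ((fun (p : Char × Int × Int) => p.1) ∘
            fun c => (c, pvFirst (s.toList.take k) c, pvLast (s.toList.take k) c)) x = x :=
        fun x _ => rfl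
      rw [List.map_congr_left hid]; exact List.map_id' _
    have hnd : d.keys.Nodup := by rw [hkeys]; exact PySem.List.nodup_dedup _
    have hcont : d.contains c = decide (c ∈ s.toList.take k) := by
      rw [PySem.Dict.contains_eq_decide_mem_keys, hkeys]
      simp
    have htake : s.toList.take (k+1) = s.toList.take k ++ [c] := by
      rw [hc, List.take_add_one, List.getElem?_eq_getElem hklt]
      rfl
    have hlentake : ((s.toList.take k).length : Int) = (k : Int) := by
      rw [List.length_take]
      omega
    simp only [List.foldl_cons, List.foldl_nil, hget]
    by_cases hm : c ∈ s.toList.take k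
    · -- character already seen: update its last index
      have hcontT : d.contains c = true := by rw [hcont]; simp [hm]
      rw [if_pos hcontT]
      have hmd : c ∈ PySem.List.dedup (s.toList.take k) := (PySem.List.mem_dedup _ _).mpr hm
      have hitem : (c, pvFirst (s.toList.take k) c, pvLast (s.toList.take k) c) ∈ d.items := by
        rw [ihk]; exact List.mem_map_of_mem hmd
      have hgetD := PySem.Dict.getD_of_mem_items d hitem hnd ((0 : Int), (0 : Int))
      simp only [PySem.Dict.modify, hgetD]
      rw [PySem.Dict.items_insert_of_contains d _ hcontT, ihk, List.map_map]
      have hded : PySem.List.dedup (s.toList.take (k+1)) = PySem.List.dedup (s.toList.take k) := by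
        rw [htake, dedup_append_singleton]
        have : (PySem.List.dedup (s.toList.take k)).contains c = true := by
          simpa using hmd
        rw [if_pos this]
      rw [hded]
      apply List.map_congr_left
      intro c' hc'
      have hmc' : c' ∈ s.toList.take k := (PySem.List.mem_dedup _ _).mp hc'
      by_cases he : c' = c
      · subst he
        simp only [Function.comp, beq_self_eq_true, if_true]
        rw [htake, pvFirst_append_mem _ _ _ hmc', pvLast_append_self, hlentake]
      · have hb : (c' == c) = false := by simp [beq_eq_false_iff_ne]; exact he
        simp only [Function.comp, hb, Bool.false_eq_true, if_false]
        rw [htake, pvFirst_append_mem _ _ _ hmc', pvLast_append_ne _ _ _ he]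
    · -- new character: append it with (k, k)
      have hcontF : d.contains c = false := by rw [hcont]; simp [hm]
      rw [if_neg (by rw [hcontF]; simp)]
      rw [PySem.Dict.items_insert_of_not_contains d _ hcontF, ihk]
      have hded : PySem.List.dedup (s.toList.take (k+1))
          = PySem.List.dedup (s.toList.take k) ++ [c] := by
        rw [htake, dedup_append_singleton]
        have : (PySem.List.dedup (s.toList.take k)).contains c = false := by
          simp [hm]
        rw [this]
        simp
      rw [hded, List.map_append]
      congr 1
      · apply List.map_congr_left
        intro c' hc'
        have hmc' : c' ∈ s.toList.take k := (PySem.List.mem_dedup _ _).mp hc'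
        have he : c' ≠ c := fun e => hm (e ▸ hmc')
        rw [htake, pvFirst_append_mem _ _ _ hmc', pvLast_append_ne _ _ _ he]
      · simp only [List.map_singleton]
        rw [htake, pvFirst_append_self _ _ hm, pvLast_append_self, hlentake]

-- ===== VERDICT (by name: the statement is the Claim_ definition above) =====
theorem find_occurrance_spec : Claim_equal_find_occurrance := by
  unfold Claim_equal_find_occurrance Spec_find_occurrance
  intro s _
  unfold find_occurrance find_occurrance_alt
  rw [PySem.Str.len_eq, loopA s s.toList.length (le_refl _), List.take_length, List.map_map]
  apply List.map_congr_left
  intro c hc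
  have hcl : c ∈ s.toList := (PySem.List.mem_dedup _ _).mp hc
  simp only [Function.comp, PySem.Str.find_eq, PySem.Str.rfind_eq, String.toList_ofList]
  rw [find_singleton _ _ hcl, rfind_singleton _ _ hcl]
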